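-- pv_equiv track=rewrite | github.com/rontimes1/Egg-Inc-Utilities | crt_calculator.py | calculate_number_of_kicks
-- ===== SOURCE A (Python) =====
-- def calculate_number_of_kicks(cr_cap, cr_per_round):
--     kick_rounds = 0
--     counter = 0
--     for i in range(1, cr_cap + 1):
--         if counter == cr_per_round and i < cr_cap:
--             kick_rounds += 1
--         counter = (counter % cr_per_round) + 1
--     return kick_rounds
-- ===== SOURCE B (Python) =====
-- def calculate_number_of_kicks(cr_cap, cr_per_round):
--     # Closed form: kicks happen exactly at i = k*cr_per_round + 1 (k >= 1) with i < cr_cap,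
--     # so the count is (cr_cap - 2) // cr_per_round for cr_cap >= 2 and positive cr_per_round.
--     if cr_per_round <= 0 or cr_cap < 2:
--         return 0
--     return (cr_cap - 2) // cr_per_round
-- ===== Notes on version B (the rewrite author's own statement) =====
-- stated objective: faster
-- what changed: replaced the O(cr_cap) counter-simulation loop with an O(1) closed-form floor division counting the arithmetic progression of kick positions
-- crash fix: A raises ZeroDivisionError when cr_per_round == 0 and cr_cap >= 1; B returns 0 there. — e.g. on calculate_number_of_kicks(1, 0): A raises ZeroDivisionError, B returns 0
import Mathlib
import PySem

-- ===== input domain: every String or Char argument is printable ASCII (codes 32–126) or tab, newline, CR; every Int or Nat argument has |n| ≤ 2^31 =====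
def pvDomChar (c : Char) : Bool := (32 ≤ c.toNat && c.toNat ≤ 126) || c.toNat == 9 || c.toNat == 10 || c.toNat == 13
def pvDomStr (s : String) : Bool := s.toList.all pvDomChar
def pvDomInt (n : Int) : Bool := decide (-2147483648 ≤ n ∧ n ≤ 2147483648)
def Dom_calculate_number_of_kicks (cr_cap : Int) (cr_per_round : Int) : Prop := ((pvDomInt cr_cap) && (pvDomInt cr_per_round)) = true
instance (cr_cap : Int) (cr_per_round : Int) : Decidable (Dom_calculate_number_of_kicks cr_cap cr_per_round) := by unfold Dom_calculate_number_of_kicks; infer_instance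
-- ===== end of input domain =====

-- B replaces A's O(cr_cap) counter-simulation loop by a closed-form floor division (faster, asymptotic).


-- ===== PORT A =====
def calculate_number_of_kicks (cr_cap : Int) (cr_per_round : Int) : Int :=
  ((PySem.List.pyRange 1 (cr_cap + 1) 1).foldl
    (fun (st : Int × Int) i =>
      (if st.2 = cr_per_round ∧ i < cr_cap then st.1 + 1 else st.1,
       PySem.Int.mod st.2 cr_per_round + 1))
    ((0 : Int), (0 : Int))).1

-- ===== PORT B =====
def calculate_number_of_kicks_alt (cr_cap : Int) (cr_per_round : Int) : Int :=
  if cr_per_round ≤ 0 ∨ cr_cap < 2 then 0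
  else PySem.Int.floordiv (cr_cap - 2) cr_per_round

-- ===== PRECONDITION & SPEC =====
-- Pre_ excludes exactly the inputs where A raises ZeroDivisionError (cr_per_round = 0 with a running loop).
def Pre_calculate_number_of_kicks (cr_cap : Int) (cr_per_round : Int) : Prop :=
  ¬ (cr_per_round = 0 ∧ 1 ≤ cr_cap)
instance (cr_cap : Int) (cr_per_round : Int) : Decidable (Pre_calculate_number_of_kicks cr_cap cr_per_round) := by
  unfold Pre_calculate_number_of_kicks; infer_instance
def pvWitness_calculate_number_of_kicks : Int × Int := (10, 3)

-- A raises ZeroDivisionError when cr_per_round = 0 and cr_cap ≥ 1; B returns 0 there.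
def Raises_calculate_number_of_kicks (cr_cap : Int) (cr_per_round : Int) : Prop :=
  cr_per_round = 0 ∧ 1 ≤ cr_cap
instance (cr_cap : Int) (cr_per_round : Int) : Decidable (Raises_calculate_number_of_kicks cr_cap cr_per_round) := by
  unfold Raises_calculate_number_of_kicks; infer_instance
def pvRaiseWitness_calculate_number_of_kicks : Int × Int := (1, 0)
def pvRaiseWitnessOut_calculate_number_of_kicks : Int := 0

def Spec_calculate_number_of_kicks (cr_cap : Int) (cr_per_round : Int) (out : Int) : Prop := out = calculate_number_of_kicks_alt cr_cap cr_per_round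
instance (cr_cap : Int) (cr_per_round : Int) (out : Int) : Decidable (Spec_calculate_number_of_kicks cr_cap cr_per_round out) := by unfold Spec_calculate_number_of_kicks; infer_instance

-- ===== CLAIM (what is proved, stated in full; the proofs are below) =====
def Claim_equal_calculate_number_of_kicks : Prop := ∀ (cr_cap : Int) (cr_per_round : Int), Dom_calculate_number_of_kicks cr_cap cr_per_round → Pre_calculate_number_of_kicks cr_cap cr_per_round → Spec_calculate_number_of_kicks cr_cap cr_per_round (calculate_number_of_kicks cr_cap cr_per_round)
def Claim_raises_calculate_number_of_kicks : Prop := (∀ (cr_cap : Int) (cr_per_round : Int), Dom_calculate_number_of_kicks cr_cap cr_per_round → Raises_calculate_number_of_kicks cr_cap cr_per_round → ¬ Pre_calculate_number_of_kicks cr_cap cr_per_round) ∧ (Dom_calculate_number_of_kicks (pvRaiseWitness_calculate_number_of_kicks.1) (pvRaiseWitness_calculate_number_of_kicks.2) ∧ Raises_calculate_number_of_kicks (pvRaiseWitness_calculate_number_of_kicks.1) (pvRaiseWitness_calculate_number_of_kicks.2) ∧ calculate_number_of_kicks_alt (pvRaiseWitness_calculate_number_of_kicks.1) (pvRaiseWitness_calculate_number_of_kicks.2)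 = pvRaiseWitnessOut_calculate_number_of_kicks)

-- ===== LEMMAS AND PROOFS =====

-- A's loop body, with the loop variable i kept.
def kickStep (cr_cap cr_per_round : Int) (st : Int × Int) (i : Int) : Int × Int :=
  (if st.2 = cr_per_round ∧ i < cr_cap then st.1 + 1 else st.1,
   PySem.Int.mod st.2 cr_per_round + 1)

-- A's loop body once i < cr_cap is known (the i-test is vacuous): ignores i.
def kickH (p : Int) (st : Int × Int) : Int × Int :=
  (if st.2 = p then st.1 + 1 else st.1, PySem.Int.mod st.2 p + 1)

theorem foldl_const_eq_iterate {α β : Type} (f : α → α) (L : List β) :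
    ∀ (init : α), L.foldl (fun st _ => f st) init = f^[L.length] init := by
  induction L with
  | nil => intro init; rfl
  | cons x xs ih =>
      intro init
      simp only [List.foldl_cons, List.length_cons, Function.iterate_succ_apply]
      exact ih (f init)

-- negative divisor: counter stays in (p, 1], never hits p, so no kicks ever
theorem kick_neg (cr_cap p : Int) (hp : p < 0) :
    ∀ (L : List Int) (st : Int × Int), p < st.2 → st.2 ≤ 1 →
      (L.foldl (kickStep cr_cap p) st).1 = st.1 := by
  intro L
  induction L with
  | nil => intro st _ _; rfl
  | cons x xs ih =>
      intro st h1 h2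
      have hne : ¬ (st.2 = p ∧ x < cr_cap) := by
        rintro ⟨h, _⟩; omega
      have hb := PySem.Int.mod_neg_bounds (a := st.2) (b := p) hp
      simp only [List.foldl_cons, kickStep, if_neg hne]
      exact ih _ (by omega) (by omega)

-- positive divisor: after n ≥ 1 iterations the state (K, C) satisfies n = K*p + C, 1 ≤ C ≤ p
theorem kick_pos_state (p : Int) (hp : 0 < p) (n : ℕ) (hn : 1 ≤ n) :
    ∃ K C : Int, (kickH p)^[n] (0, 0) = (K, C) ∧ (n : Int) = K * p + C ∧ 1 ≤ C ∧ C ≤ p := by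
  induction n with
  | zero => omega
  | succ m ih =>
      by_cases hm : 1 ≤ m
      · obtain ⟨K, C, hstate, hsum, hC1, hC2⟩ := ih hm
        rw [Function.iterate_succ_apply', hstate]
        by_cases hCp : C = p
        · refine ⟨K + 1, 1, ?_, ?_, le_refl 1, hp⟩
          · have hm0 : PySem.Int.mod p p = 0 := by
              rw [PySem.Int.mod_eq_zero_iff_dvd]
            simp only [kickH, hCp, hm0]
            norm_num
          · push_cast
            have : (K + 1) * p = K * p + p := by ring
            omega
        · refine ⟨K, C + 1, ?_, ?_, by omega, by omega⟩
          · simp only [kickH, if_neg hCp]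
            have hmc : PySem.Int.mod C p = C := by
              rw [PySem.Int.mod_eq_emod_of_pos hp]
              exact Int.emod_eq_of_lt (by omega) (by omega)
            rw [hmc]
          · push_cast; omega
      · have hm0 : m = 0 := by omega
        subst hm0
        refine ⟨0, 1, ?_, by norm_num, le_refl 1, hp⟩
        have h0 : ¬ ((0 : Int) = p) := by omega
        have hm0 : PySem.Int.mod 0 p = 0 := by
          rw [PySem.Int.mod_eq_zero_iff_dvd]; exact dvd_zero p
        show kickH p (0, 0) = (0, 1)
        simp only [kickH, hm0]
        norm_num [h0]

-- ===== VERDICT (by name: the statement is the Claim_ definition above) =====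
theorem calculate_number_of_kicks_spec : Claim_equal_calculate_number_of_kicks := by
  intro cap p _ hpre
  unfold Spec_calculate_number_of_kicks calculate_number_of_kicks calculate_number_of_kicks_alt
  have hstep : (fun (st : Int × Int) i =>
      (if st.2 = p ∧ i < cap then st.1 + 1 else st.1, PySem.Int.mod st.2 p + 1))
      = kickStep cap p := rfl
  rw [hstep]
  by_cases hcap : cap ≤ 0
  · -- empty loop
    rw [PySem.List.pyRange_one_eq_nil (by omega)]
    simp only [List.foldl_nil]
    rw [if_pos (by omega)]
  · have hcap1 : 1 ≤ cap := by omega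
    have hp0 : p ≠ 0 := fun h => hpre ⟨h, hcap1⟩
    by_cases hpneg : p < 0
    · rw [kick_neg cap p hpneg _ (0, 0) (by omega) (by omega)]
      rw [if_pos (Or.inl (by omega))]
    · have hp : 0 < p := by omega
      by_cases hcap2 : cap < 2
      · -- cap = 1 : single iteration, i = 1, no kick
        have hcap' : cap = 1 := by omega
        subst hcap'
        rw [show (1 : Int) + 1 = 1 + 1 from rfl, PySem.List.pyRange_one_succ_right (by omega),
            PySem.List.pyRange_one_eq_nil (by omega)]
        simp only [List.nil_append, List.foldl_cons, List.foldl_nil, kickStep]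
        rw [if_neg (by omega), if_pos (Or.inr (by omega))]
      · -- cap ≥ 2
        rw [not_lt] at hcap2
        -- split off the last iteration i = cap
        rw [PySem.List.pyRange_one_succ_right (by omega), List.foldl_append]
        -- on the prefix every i < cap, so the step is kickH
        have hcongr : (PySem.List.pyRange 1 cap 1).foldl (kickStep cap p) (0, 0)
            = (PySem.List.pyRange 1 cap 1).foldl (fun st _ => kickH p st) (0, 0) := by
          apply PySem.List.foldl_congr_mem
          intro acc x hx
          have hxlt : x < cap := ((PySem.List.mem_pyRange_one).1 hx).2
          simp only [kickStep, kickH, hxlt, and_true]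
        rw [hcongr, foldl_const_eq_iterate (kickH p)]
        have hlen : (PySem.List.pyRange 1 cap 1).length = (cap - 1).toNat :=
          PySem.List.length_pyRange_one 1 cap
        rw [hlen]
        obtain ⟨K, C, hstate, hsum, hC1, hC2⟩ :=
          kick_pos_state p hp (cap - 1).toNat (by omega)
        have hcast : (((cap - 1).toNat : Nat) : Int) = cap - 1 := by omega
        rw [hcast] at hsum
        rw [hstate]
        simp only [kickStep, List.foldl_cons, List.foldl_nil]
        rw [if_neg (by rintro ⟨_, h⟩; omega)]
        rw [if_neg (by rw [not_or]; omega)]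
        have : PySem.Int.floordiv (cap - 2) p = K := by
          rw [PySem.Int.floordiv_eq_iff_of_pos hp]
          constructor
          · nlinarith
          · nlinarith
        omega

theorem calculate_number_of_kicks_raises : Claim_raises_calculate_number_of_kicks := by
  unfold Claim_raises_calculate_number_of_kicks
  refine ⟨?_, by decide⟩
  intro cap p _ hr hpre
  exact hpre ⟨hr.1, hr.2⟩

-- witness self-check: the crash-fix witness really lies inside Raises_ (read off the raises theorem)
theorem pvRaiseWitness_ok :
    Raises_calculate_number_of_kicks pvRaiseWitness_calculate_number_of_kicks.1 pvRaiseWitness_calculate_number_of_kicks.2 :=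
  calculate_number_of_kicks_raises.2.2.1
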